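-- pv_equiv track=rewrite | github.com/Omkarchaithanya/Multi-Domain- | code/response_generator.py | _source_citation
-- ===== SOURCE A (Python) =====
-- from typing import Dict, List, Optional, Tuple
--
-- def _source_citation(chunks: List[Dict]) -> str:
--     sources = []
--     for chunk in chunks:
--         source = chunk.get("source", "")
--         if source and source not in sources:
--             sources.append(source)
--         if len(sources) == 3:
--             break
--     return ";".join(sources)
-- ===== SOURCE B (Python) =====
-- def _source_citation(chunks):
--     # staged selection: scan the list afresh for each of the (up to) three
--     # citations, each scan returning the first non-empty source not yet picked
--     def next_source(exclude):
--         for chunk in chunks: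
--             s = chunk.get("source", "")
--             if s and s not in exclude:
--                 return s
--         return None
--     a = next_source([])
--     if a is None:
--         return ""
--     b = next_source([a])
--     if b is None:
--         return ";".join([a])
--     c = next_source([a, b])
--     if c is None:
--         return ";".join([a, b])
--     return ";".join([a, b, c])
-- ===== Notes on version B (the rewrite author's own statement) =====
-- stated objective: alternative
-- what changed: A keeps one growing 'sources' accumulator with an in-loop membership check and a break at length 3; B has no accumulator loop at all: it performs up to three independent selection scans, each restarting from the front and returning the first non-empty source not among the already-picked ones, then joins what was picked.
import Mathlib
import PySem

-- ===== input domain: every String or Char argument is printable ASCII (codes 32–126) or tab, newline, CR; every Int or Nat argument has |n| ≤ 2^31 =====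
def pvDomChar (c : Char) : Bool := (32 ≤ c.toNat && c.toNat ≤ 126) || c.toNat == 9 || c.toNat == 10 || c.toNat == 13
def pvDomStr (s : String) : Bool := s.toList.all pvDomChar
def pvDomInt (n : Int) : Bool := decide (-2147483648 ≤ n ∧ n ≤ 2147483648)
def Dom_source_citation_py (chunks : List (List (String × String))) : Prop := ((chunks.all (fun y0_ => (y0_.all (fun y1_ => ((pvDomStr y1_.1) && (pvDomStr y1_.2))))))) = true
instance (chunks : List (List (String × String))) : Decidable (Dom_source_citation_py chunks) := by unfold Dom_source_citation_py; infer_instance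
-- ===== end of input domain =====

-- B replaces A's single accumulate-with-membership-check-and-break loop by up to three
-- independent restart scans, each returning the first non-empty source not yet picked
-- ("alternative": structurally different, same O(n) cost).


-- ===== PORT A =====
-- the for-loop with `break`: appends a non-empty unseen source, stops once 3 are collected
def pvSrcLoop : List (List (String × String)) → List String → List String
  | [], sources => sources
  | chunk :: rest, sources =>
    let source := PySem.Dict.getD ⟨chunk⟩ "source" ""
    let sources := if source != "" && !(sources.contains source) then sources ++ [source] else sources
    if sources.length == 3 then sources else pvSrcLoop rest sources

def source_citation_py (chunks : List (List (String × String))) : String :=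
  PySem.Str.join ";" (pvSrcLoop chunks [])

-- ===== PORT B =====
-- Source B's helper next_source(exclude): scan chunks from the front, return the first
-- non-empty source not in exclude, or None
def pvNextSource (chunks : List (List (String × String))) (exclude : List String) : Option String :=
  match chunks with
  | [] => none
  | chunk :: rest =>
    let s := PySem.Dict.getD ⟨chunk⟩ "source" ""
    if s != "" && !(exclude.contains s) then some s else pvNextSource rest exclude

def source_citation_py_alt (chunks : List (List (String × String))) : String :=
  match pvNextSource chunks [] with
  | none => ""
  | some a =>
    match pvNextSource chunks [a] with
    | none => PySem.Str.join ";" [a]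
    | some b =>
      match pvNextSource chunks [a, b] with
      | none => PySem.Str.join ";" [a, b]
      | some c => PySem.Str.join ";" [a, b, c]

-- ===== PRECONDITION & SPEC =====
def Spec_source_citation_py (chunks : List (List (String × String))) (out : String) : Prop := out = source_citation_py_alt chunks
instance (chunks : List (List (String × String))) (out : String) : Decidable (Spec_source_citation_py chunks out) := by unfold Spec_source_citation_py; infer_instance

-- ===== CLAIM (what is proved, stated in full; the proofs are below) =====
def Claim_equal_source_citation_py : Prop := ∀ (chunks : List (List (String × String))), Dom_source_citation_py chunks → Spec_source_citation_py chunks (source_citation_py chunks)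

-- ===== LEMMAS AND PROOFS =====

-- abbreviation used by the proofs: the list of non-empty sources, in order
def pvL (chunks : List (List (String × String))) : List String :=
  (chunks.map (fun c => PySem.Dict.getD ⟨c⟩ "source" "")).filter (fun s => s != "")

-- the accumulator of Set.add-folding is always a prefix of the result
theorem pv_foldl_add_prefix (xs : List String) : ∀ (acc : List String),
    acc <+: List.foldl PySem.Set.add acc xs := by
  induction xs with
  | nil => intro acc; exact List.prefix_refl acc
  | cons x xs ih =>
    intro acc
    refine List.IsPrefix.trans ?_ (ih (PySem.Set.add acc x))
    simp only [PySem.Set.add]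
    split
    · exact List.prefix_refl acc
    · exact ⟨[x], rfl⟩

-- A's break-at-3 loop computes the first 3 elements of the ordered dedup fold
theorem pv_loop_take (cs : List (List (String × String))) : ∀ (acc : List String),
    acc.length < 3 →
    pvSrcLoop cs acc =
      (List.foldl PySem.Set.add acc
        ((cs.map (fun c => PySem.Dict.getD ⟨c⟩ "source" "")).filter (fun s => s != ""))).take 3 := by
  induction cs with
  | nil =>
    intro acc h
    simp [pvSrcLoop, List.take_of_length_le (by omega : acc.length ≤ 3)]
  | cons chunk rest ih =>
    intro acc h
    simp only [pvSrcLoop, List.map_cons, List.filter_cons]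
    by_cases hs : (PySem.Dict.getD ⟨chunk⟩ "source" "" != "") = true
    · simp only [hs, if_pos]
      by_cases hm : acc.contains (PySem.Dict.getD ⟨chunk⟩ "source" "") = true
      · -- already seen: both sides keep acc
        simp only [hm, Bool.not_true, Bool.and_false, List.foldl_cons]
        have hadd : PySem.Set.add acc (PySem.Dict.getD ⟨chunk⟩ "source" "") = acc := by
          simp only [PySem.Set.add]
          rw [if_pos (by simpa using hm)]
        have hlen : (acc.length == 3) = false := by simp; omega
        simp only [Bool.false_eq_true, if_false, hlen, hadd]
        exact ih acc h
      · -- new source: appended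
        have hm' : acc.contains (PySem.Dict.getD ⟨chunk⟩ "source" "") = false := by
          simpa using hm
        have hadd : PySem.Set.add acc (PySem.Dict.getD ⟨chunk⟩ "source" "") =
            acc ++ [PySem.Dict.getD ⟨chunk⟩ "source" ""] := by
          simp only [PySem.Set.add]
          rw [if_neg (by simpa using hm')]
        simp only [hm', Bool.not_false, Bool.and_true, if_true, List.foldl_cons, hadd]
        set acc' := acc ++ [PySem.Dict.getD ⟨chunk⟩ "source" ""] with hacc'
        by_cases h3 : acc'.length = 3
        · -- break: the fold only extends acc', take 3 recovers acc'
          simp only [h3, beq_self_eq_true, if_true]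
          obtain ⟨t, ht⟩ := pv_foldl_add_prefix
            ((rest.map (fun c => PySem.Dict.getD ⟨c⟩ "source" "")).filter (fun s => s != "")) acc'
          rw [← ht, List.take_append_of_le_length (by omega), List.take_of_length_le (by omega)]
        · have hlen : (acc'.length == 3) = false := by simpa using h3
          have hlt : acc'.length < 3 := by
            have : acc'.length = acc.length + 1 := by simp [hacc']
            omega
          simp only [hlen, Bool.false_eq_true, if_false]
          exact ih acc' hlt
    · -- empty source: filtered out, nothing appended
      have hs' : (PySem.Dict.getD ⟨chunk⟩ "source" "" != "") = false := by simpa using hs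
      have hlen : (acc.length == 3) = false := by simp; omega
      simp only [hs', Bool.false_and, Bool.false_eq_true, if_false, hlen]
      exact ih acc h

theorem pv_loop_take' (chunks : List (List (String × String))) :
    pvSrcLoop chunks [] = (List.foldl PySem.Set.add [] (pvL chunks)).take 3 := by
  unfold pvL
  exact pv_loop_take chunks [] (by simp)

-- B's scan returns the head of the filtered source list with the excluded ones removed
theorem pv_next_head (chunks : List (List (String × String))) : ∀ (ex : List String),
    pvNextSource chunks ex =
      (((chunks.map (fun c => PySem.Dict.getD ⟨c⟩ "source" "")).filter (fun s => s != "")).filter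
        (fun s => !ex.contains s)).head? := by
  induction chunks with
  | nil => intro ex; rfl
  | cons chunk rest ih =>
    intro ex
    have hunf : pvNextSource (chunk :: rest) ex =
        (if (PySem.Dict.getD ⟨chunk⟩ "source" "" != "") &&
            !(ex.contains (PySem.Dict.getD ⟨chunk⟩ "source" "")) then
          some (PySem.Dict.getD ⟨chunk⟩ "source" "")
        else pvNextSource rest ex) := rfl
    rw [hunf, List.map_cons, List.filter_cons]
    by_cases h1 : (PySem.Dict.getD ⟨chunk⟩ "source" "" != "") = true
    · by_cases h2 : ex.contains (PySem.Dict.getD ⟨chunk⟩ "source" "") = true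
      · simp only [h1, h2, Bool.not_true, Bool.and_false, Bool.false_eq_true, if_false,
          if_true, List.filter_cons, Bool.false_eq_true]
        rw [ih ex]
      · have h2' : ex.contains (PySem.Dict.getD ⟨chunk⟩ "source" "") = false := by simpa using h2
        simp only [h1, h2', Bool.not_false, Bool.and_true, if_true, List.filter_cons,
          List.head?_cons]
    · have h1' : (PySem.Dict.getD ⟨chunk⟩ "source" "" != "") = false := by simpa using h1
      simp only [h1', Bool.false_and, Bool.false_eq_true, if_false]
      exact ih ex

theorem pv_next_head' (chunks : List (List (String × String))) (ex : List String) :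
    pvNextSource chunks ex = ((pvL chunks).filter (fun s => !ex.contains s)).head? := by
  unfold pvL
  exact pv_next_head chunks ex

theorem pv_filter_nil (M : List String) :
    M.filter (fun s => !([] : List String).contains s) = M :=
  List.filter_eq_self.mpr (fun _ _ => rfl)

-- filtering out elements already contained in the accumulator does not change the fold
theorem pv_filter_noop (M : List String) : ∀ (acc ex : List String),
    (∀ s, ex.contains s = true → acc.contains s = true) →
    List.foldl PySem.Set.add acc (M.filter (fun s => !ex.contains s)) =
      List.foldl PySem.Set.add acc M := by
  induction M with
  | nil => intro acc ex _; rfl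
  | cons x M ih =>
    intro acc ex hsub
    simp only [List.filter_cons]
    by_cases hx : ex.contains x = true
    · have hacc : x ∈ acc := by simpa using hsub x hx
      have hadd : PySem.Set.add acc x = acc := by
        simp [PySem.Set.add, hacc]
      simp only [hx, Bool.not_true, Bool.false_eq_true, if_false, List.foldl_cons, hadd]
      exact ih acc ex hsub
    · have hx' : ex.contains x = false := by simpa using hx
      simp only [hx', Bool.not_false, if_true, List.foldl_cons]
      refine ih (PySem.Set.add acc x) ex (fun s hs => ?_)
      have hmem : s ∈ acc := by simpa using hsub s hs
      simp only [PySem.Set.add]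
      split
      · simpa using hmem
      · simp [hmem]

-- a fresh element at the head of the accumulator is just carried through the fold
theorem pv_fresh_head (M : List String) : ∀ (x : String) (acc : List String), x ∉ M →
    List.foldl PySem.Set.add (x :: acc) M = x :: List.foldl PySem.Set.add acc M := by
  induction M with
  | nil => intro x acc _; rfl
  | cons m M ih =>
    intro x acc hx
    have hmx : ¬ m = x := by
      intro h; exact hx (by simp [h])
    have hxM : x ∉ M := fun h => hx (List.mem_cons_of_mem m h)
    simp only [List.foldl_cons]
    by_cases hc : m ∈ acc
    · have h1 : PySem.Set.add (x :: acc) m = x :: acc := by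
        simp [PySem.Set.add, List.mem_cons_of_mem x hc]
      have h2 : PySem.Set.add acc m = acc := by
        simp [PySem.Set.add, hc]
      rw [h1, h2]; exact ih x acc hxM
    · have h1 : PySem.Set.add (x :: acc) m = x :: (acc ++ [m]) := by
        have hnm : m ∉ x :: acc := by
          simp only [List.mem_cons]
          rintro (h | h)
          · exact hmx h
          · exact hc h
        simp [PySem.Set.add, hnm]
      have h2 : PySem.Set.add acc m = acc ++ [m] := by
        simp [PySem.Set.add, hc]
      rw [h1, h2]; exact ih x (acc ++ [m]) hxM

-- peeling one fresh element off the dedup fold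
theorem pv_step (x : String) (M : List String) :
    List.foldl PySem.Set.add [x] M =
      x :: List.foldl PySem.Set.add [] (M.filter (fun s => !([x] : List String).contains s)) := by
  have hnoop := pv_filter_noop M [x] [x] (fun s hs => hs)
  rw [← hnoop]
  refine pv_fresh_head _ x [] ?_
  intro hmem
  have := List.of_mem_filter hmem
  simp at this

-- peeling the head of the source list off the dedup fold
theorem pv_peel (a : String) (L' : List String) :
    List.foldl PySem.Set.add ([] : List String) (a :: L')
      = a :: List.foldl PySem.Set.add []
          ((a :: L').filter (fun s => !([a] : List String).contains s)) := by
  rw [List.foldl_cons]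
  have hstart : PySem.Set.add ([] : List String) a = [a] := by
    simp [PySem.Set.add]
  have hpa : ((a :: L').filter (fun s => !([a] : List String).contains s))
      = L'.filter (fun s => !([a] : List String).contains s) := by
    rw [List.filter_cons]
    simp
  rw [hstart, pv_step a L', hpa]

-- ===== VERDICT (by name: the statement is the Claim_ definition above) =====
theorem source_citation_py_spec : Claim_equal_source_citation_py := by
  intro chunks _
  unfold Spec_source_citation_py source_citation_py
  rw [pv_loop_take']
  cases hLc : pvL chunks with
  | nil =>
    have h0 : pvNextSource chunks [] = none := by
      rw [pv_next_head', pv_filter_nil, hLc]; rfl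
    have halt : source_citation_py_alt chunks = "" := by
      unfold source_citation_py_alt
      simp only [h0]
    rw [halt]
    rfl
  | cons a L' =>
    have h0 : pvNextSource chunks [] = some a := by
      rw [pv_next_head', pv_filter_nil, hLc]; rfl
    have hD1 := pv_peel a L'
    cases hM1 : (a :: L').filter (fun s => !([a] : List String).contains s) with
    | nil =>
      have h1 : pvNextSource chunks [a] = none := by
        rw [pv_next_head', hLc, hM1]; rfl
      have halt : source_citation_py_alt chunks = PySem.Str.join ";" [a] := by
        unfold source_citation_py_alt
        simp only [h0, h1]
      rw [halt, hD1, hM1]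
      rfl
    | cons b M1' =>
      have h1 : pvNextSource chunks [a] = some b := by
        rw [pv_next_head', hLc, hM1]; rfl
      have hq3 : (b :: M1').filter (fun s => !([b] : List String).contains s)
          = (a :: L').filter (fun s => !([a, b] : List String).contains s) := by
        rw [← hM1, List.filter_filter]
        refine List.filter_congr ?_
        intro s _
        cases ha : (s == a) <;> cases hb : (s == b) <;>
          simp [List.contains_cons, ha, hb, Bool.and_comm]
      have hD2 := pv_peel b M1'
      cases hM2 : (a :: L').filter (fun s => !([a, b] : List String).contains s) with
      | nil =>
        have h2 : pvNextSource chunks [a, b] = none := by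
          rw [pv_next_head', hLc, hM2]; rfl
        have halt : source_citation_py_alt chunks = PySem.Str.join ";" [a, b] := by
          unfold source_citation_py_alt
          simp only [h0, h1, h2]
        rw [halt, hD1, hM1, hD2, hq3, hM2]
        rfl
      | cons c M2' =>
        have h2 : pvNextSource chunks [a, b] = some c := by
          rw [pv_next_head', hLc, hM2]; rfl
        have halt : source_citation_py_alt chunks = PySem.Str.join ";" [a, b, c] := by
          unfold source_citation_py_alt
          simp only [h0, h1, h2]
        obtain ⟨t, ht⟩ := pv_foldl_add_prefix M2' [c]
        have hD3 : List.foldl PySem.Set.add ([] : List String) (c :: M2') = c :: t := by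
          rw [List.foldl_cons]
          have hstart : PySem.Set.add ([] : List String) c = [c] := by
            simp [PySem.Set.add]
          rw [hstart, ← ht]; rfl
        rw [halt, hD1, hM1, hD2, hq3, hM2, hD3]
        rfl
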